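-- pv_equiv track=rewrite | github.com/ZimonKuhs/Python | src/gaming/doom/mapNames.py | parseMapName
-- ===== SOURCE A (Python) =====
-- def parseMapName(string):
--     parts = string.split()
--     if len(parts) < 2:
--         raise ValueError(f"Invalid line found: {string}")
--
--     middle = ""
--     name = ""
--
--     for part in parts[1:]:
--         if part == "by":
--             break
--
--         name = f"{name}{middle}{part}"
--         middle = " "
--
--     return name
-- ===== SOURCE B (Python) =====
-- def parseMapName(string):
--     parts = string.split()
--     if len(parts) < 2:
--         raise ValueError(f"Invalid line found: {string}")
--
--     tokens = parts[1:]
--     cut = tokens.index("by") if "by" in tokens else len(tokens)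
--     return " ".join(tokens[:cut])
-- ===== Notes on version B (the rewrite author's own statement) =====
-- stated objective: simpler
-- what changed: B locates the 'by' delimiter once with index/membership and returns one bulk ' '.join of the prefix, instead of A's token-by-token accumulation with a running separator variable.
import Mathlib
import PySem

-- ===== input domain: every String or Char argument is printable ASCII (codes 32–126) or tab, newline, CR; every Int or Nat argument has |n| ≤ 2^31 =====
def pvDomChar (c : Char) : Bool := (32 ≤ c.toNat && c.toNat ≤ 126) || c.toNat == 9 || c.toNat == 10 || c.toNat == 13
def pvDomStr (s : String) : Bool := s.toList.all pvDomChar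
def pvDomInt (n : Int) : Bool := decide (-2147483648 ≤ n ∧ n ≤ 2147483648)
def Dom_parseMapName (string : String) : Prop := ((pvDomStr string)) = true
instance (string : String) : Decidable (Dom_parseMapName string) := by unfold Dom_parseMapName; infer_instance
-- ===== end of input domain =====

-- ===== PORT A =====
-- B changes only how the name is assembled: one bulk join over a prefix found up front, instead of
-- A's token-by-token accumulation with a running separator. Objective: simpler. (No speed claim.)
def parseMapNameLoop : List String → String → String → String
  | [], _middle, name => name
  | part :: rest, middle, name =>
    if part = "by" then name
    else parseMapNameLoop rest " " (name ++ middle ++ part)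

def parseMapName (string : String) : String :=
  let parts := PySem.Str.split₀ string
  -- if len(parts) < 2: raise ValueError — excluded by Pre_parseMapName
  parseMapNameLoop (PySem.List.slice parts (some 1) none) "" ""

-- ===== PORT B =====
def parseMapName_alt (string : String) : String :=
  let parts := PySem.Str.split₀ string
  -- if len(parts) < 2: raise ValueError — excluded by Pre_parseMapName
  let tokens := PySem.List.slice parts (some 1) none
  -- cut = tokens.index("by") if "by" in tokens else len(tokens)
  let cut : Nat := if tokens.contains "by" then (PySem.List.index? tokens "by").getD 0 else tokens.length
  -- " ".join(tokens[:cut])  (cut is a nonnegative in-range index, so the slice is a take)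
  PySem.Str.join " " (PySem.List.slice tokens none (some (cut : Int)))

-- ===== PRECONDITION & SPEC =====
-- Pre_: A raises ValueError when the string has fewer than two whitespace-separated words.
def Pre_parseMapName (string : String) : Prop := 2 ≤ (PySem.Str.split₀ string).length
instance (string : String) : Decidable (Pre_parseMapName string) := by unfold Pre_parseMapName; infer_instance
def pvWitness_parseMapName : String := "MAP01 Entryway by John Romero"
def Spec_parseMapName (string : String) (out : String) : Prop := out = parseMapName_alt string
instance (string : String) (out : String) : Decidable (Spec_parseMapName string out) := by unfold Spec_parseMapName; infer_instance

-- ===== CLAIM (what is proved, stated in full; the proofs are below) =====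
def Claim_equal_parseMapName : Prop := ∀ (string : String), Dom_parseMapName string → Pre_parseMapName string → Spec_parseMapName string (parseMapName string)

-- ===== LEMMAS AND PROOFS =====
lemma join_sp_cons (s t : String) (xs : List String) :
    PySem.Str.join " " (s :: t :: xs) = s ++ " " ++ PySem.Str.join " " (t :: xs) := by
  apply String.toList_inj.mp
  simp [PySem.Str.toList_join, PySem.Chars.join_cons_cons]

lemma join_sp_single (s : String) : PySem.Str.join " " [s] = s := by
  apply String.toList_inj.mp
  simp [PySem.Str.toList_join, PySem.Chars.join, List.intercalate]

lemma join_sp_nil : PySem.Str.join " " ([] : List String) = "" := by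
  apply String.toList_inj.mp
  simp [PySem.Str.toList_join, PySem.Chars.join, List.intercalate]

/-- The cut/take step of B equals taking the prefix before the first "by". -/
lemma take_cut_eq (ts : List String) :
    ts.take (if ts.contains "by" then (PySem.List.index? ts "by").getD 0 else ts.length)
      = ts.takeWhile (fun t => decide (t ≠ "by")) := by
  induction ts with
  | nil => simp
  | cons p rest ih =>
    by_cases hp : p = "by"
    · subst hp
      rw [if_pos (by simp), PySem.List.index?_cons_self]
      simp
    · by_cases hm : rest.contains "by"
      · have hsome : (PySem.List.index? rest "by").isSome := by
          rw [PySem.List.index?_isSome_iff]; simpa using hm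
        obtain ⟨k, hk⟩ := Option.isSome_iff_exists.mp hsome
        rw [if_pos (by simp only [List.contains_cons, Bool.or_eq_true]; exact Or.inr hm : ((p :: rest).contains "by") = true)]
        rw [PySem.List.index?_cons_of_ne rest hp, hk]
        rw [List.takeWhile_cons, if_pos (by simp [hp])]
        have : ((some k).map (fun x => x + 1)).getD 0 = k + 1 := rfl
        rw [this, List.take_succ_cons, ← ih, if_pos hm, hk]
        rfl
      · have hc : ¬(((p :: rest).contains "by") = true) := by
          intro h
          rcases (by simpa using h : "by" = p ∨ "by" ∈ rest) with h1 | h2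
          · exact hp h1.symm
          · exact hm (by simpa using h2)
        rw [if_neg hc, List.take_length]
        rw [List.takeWhile_cons, if_pos (by simp [hp]), ← ih, if_neg hm, List.take_length]

/-- A's loop from the " " separator state appends the joined prefix before the first "by"
    (with a leading separator when that prefix is nonempty). -/
lemma loop_sep_eq (ts : List String) : ∀ (name : String),
    parseMapNameLoop ts " " name =
      (if _h : ts.takeWhile (fun t => decide (t ≠ "by")) = [] then name
       else name ++ " " ++ PySem.Str.join " " (ts.takeWhile (fun t => decide (t ≠ "by")))) := by
  induction ts with
  | nil => intro name; simp [parseMapNameLoop]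
  | cons p rest ih =>
    intro name
    by_cases hp : p = "by"
    · subst hp
      rw [parseMapNameLoop, if_pos rfl, List.takeWhile_cons]
      simp
    · rw [parseMapNameLoop, if_neg hp, ih, List.takeWhile_cons, if_pos (by simp [hp])]
      by_cases h0 : rest.takeWhile (fun t => decide (t ≠ "by")) = []
      · rw [dif_pos h0, h0, dif_neg (by simp), join_sp_single]
      · obtain ⟨q, qs, hq⟩ : ∃ q qs, rest.takeWhile (fun t => decide (t ≠ "by")) = q :: qs := by
          cases hrw : rest.takeWhile (fun t => decide (t ≠ "by")) with
          | nil => exact absurd hrw h0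
          | cons q qs => exact ⟨q, qs, rfl⟩
        rw [dif_neg h0, hq, dif_neg (by simp), join_sp_cons]
        simp [String.append_assoc]

/-- A's whole loop from the initial "" separator state is the join of that prefix. -/
lemma loop_init_eq (ts : List String) :
    parseMapNameLoop ts "" "" = PySem.Str.join " " (ts.takeWhile (fun t => decide (t ≠ "by"))) := by
  cases ts with
  | nil => rw [parseMapNameLoop]; simp [join_sp_nil]
  | cons p rest =>
    by_cases hp : p = "by"
    · subst hp
      rw [parseMapNameLoop, if_pos rfl, List.takeWhile_cons]
      simp [join_sp_nil]
    · rw [parseMapNameLoop, if_neg hp, loop_sep_eq, List.takeWhile_cons, if_pos (by simp [hp])]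
      by_cases h0 : rest.takeWhile (fun t => decide (t ≠ "by")) = []
      · rw [dif_pos h0, h0, join_sp_single]
        simp
      · obtain ⟨q, qs, hq⟩ : ∃ q qs, rest.takeWhile (fun t => decide (t ≠ "by")) = q :: qs := by
          cases hrw : rest.takeWhile (fun t => decide (t ≠ "by")) with
          | nil => exact absurd hrw h0
          | cons q qs => exact ⟨q, qs, rfl⟩
        rw [dif_neg h0, hq, join_sp_cons]
        simp [String.append_assoc]

-- ===== VERDICT (by name: the statement is the Claim_ definition above) =====
theorem parseMapName_spec : Claim_equal_parseMapName := by
  intro string _hdom _hpre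
  unfold Spec_parseMapName parseMapName parseMapName_alt
  simp only []
  rw [PySem.List.slice_to_natCast, take_cut_eq, loop_init_eq]
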